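-- pv_equiv track=rewrite | github.com/abdulhaadi0303/Speech-AI-Diarization-Project | whisper-backend/auth/service.py | _determine_user_role
-- ===== SOURCE A (Python) =====
-- from typing import Optional, Dict, Any, List
--
-- def _determine_user_role(groups: List[str]) -> str:
--     """Determine user role based on Authentik groups"""
--     # Convert groups to lowercase for case-insensitive comparison
--     groups_lower = [group.lower() for group in groups]
--
--     # Check for admin roles first
--     if any(group in groups_lower for group in ["superadmin", "super-admin", "superadmins"]):
--         return "superadmin"
--     elif any(group in groups_lower for group in ["admin", "admins", "administrators"]):
--         return "admin"
--     else:
--         return "user"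
-- ===== SOURCE B (Python) =====
-- _ROLE_RANKS = {
--     "superadmin": 2, "super-admin": 2, "superadmins": 2,
--     "admin": 1, "admins": 1, "administrators": 1,
-- }
--
-- def _determine_user_role(groups):
--     rank = 0
--     for group in groups:
--         rank = max(rank, _ROLE_RANKS.get(group.lower(), 0))
--     if rank == 2:
--         return "superadmin"
--     if rank == 1:
--         return "admin"
--     return "user"
-- ===== Notes on version B (the rewrite author's own statement) =====
-- stated objective: idiomatic
-- what changed: Replaced A's two separate any()-membership passes over a lowercased copy of the list with a single pass over the groups that looks each lowercased group up in a keyword-to-rank dict and tracks the maximum rank, then maps rank to role.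
import Mathlib
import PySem

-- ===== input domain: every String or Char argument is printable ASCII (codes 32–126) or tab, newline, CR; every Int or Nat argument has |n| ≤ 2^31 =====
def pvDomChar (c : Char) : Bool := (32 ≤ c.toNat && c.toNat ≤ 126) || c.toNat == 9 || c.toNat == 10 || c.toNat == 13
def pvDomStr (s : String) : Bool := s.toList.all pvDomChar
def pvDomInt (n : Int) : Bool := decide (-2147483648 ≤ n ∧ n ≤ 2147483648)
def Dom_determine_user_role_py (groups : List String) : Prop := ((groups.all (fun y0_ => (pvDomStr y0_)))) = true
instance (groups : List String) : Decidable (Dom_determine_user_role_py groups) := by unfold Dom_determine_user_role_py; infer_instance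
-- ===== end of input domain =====

-- B replaces A's two any()-membership passes over a lowercased copy with one pass over the groups, looking each lowercased group up in a keyword→rank dict and keeping the max rank (idiomatic; same cost).


-- ===== PORT A =====
def determine_user_role_py (groups : List String) : String :=
  let groups_lower := groups.map PySem.Str.lower
  if (["superadmin", "super-admin", "superadmins"] : List String).any
      (fun group => groups_lower.contains group) then "superadmin"
  else if (["admin", "admins", "administrators"] : List String).any
      (fun group => groups_lower.contains group) then "admin"
  else "user"

-- ===== PORT B =====
def pvRoleRanks : PySem.Dict String Nat :=
  PySem.Dict.ofList [("superadmin", 2), ("super-admin", 2), ("superadmins", 2),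
                     ("admin", 1), ("admins", 1), ("administrators", 1)]

def determine_user_role_py_alt (groups : List String) : String :=
  let rank := groups.foldl (fun r group => max r (pvRoleRanks.getD (PySem.Str.lower group) 0)) 0
  if rank = 2 then "superadmin"
  else if rank = 1 then "admin"
  else "user"

-- ===== PRECONDITION & SPEC =====
def Spec_determine_user_role_py (groups : List String) (out : String) : Prop := out = determine_user_role_py_alt groups
instance (groups : List String) (out : String) : Decidable (Spec_determine_user_role_py groups out) := by unfold Spec_determine_user_role_py; infer_instance

-- ===== CLAIM (what is proved, stated in full; the proofs are below) =====
def Claim_equal_determine_user_role_py : Prop := ∀ (groups : List String), Dom_determine_user_role_py groups → Spec_determine_user_role_py groups (determine_user_role_py groups)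

-- ===== LEMMAS AND PROOFS =====

lemma ranks_mk : pvRoleRanks = PySem.Dict.mk
    [("superadmin", 2), ("super-admin", 2), ("superadmins", 2),
     ("admin", 1), ("admins", 1), ("administrators", 1)] := by decide

lemma getD_two_iff (s : String) :
    pvRoleRanks.getD s 0 = 2 ↔ (s = "superadmin" ∨ s = "super-admin" ∨ s = "superadmins") := by
  simp [ranks_mk, PySem.Dict.getD, PySem.Dict.get?_mk_cons, beq_iff_eq]
  split_ifs <;> simp_all [eq_comm, PySem.Dict.get?]

lemma getD_one_iff (s : String) :
    pvRoleRanks.getD s 0 = 1 ↔ (s = "admin" ∨ s = "admins" ∨ s = "administrators") := by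
  simp [ranks_mk, PySem.Dict.getD, PySem.Dict.get?_mk_cons, beq_iff_eq]
  split_ifs <;> simp_all [eq_comm, PySem.Dict.get?]

lemma getD_le_two (s : String) : pvRoleRanks.getD s 0 ≤ 2 := by
  simp [ranks_mk, PySem.Dict.getD, PySem.Dict.get?_mk_cons]
  split_ifs <;> simp [PySem.Dict.get?]

-- the running max is either its initial value or the rank of some element
lemma foldl_max_mem_str (f : String → Nat) (xs : List String) (init : Nat) :
    xs.foldl (fun a g => max a (f g)) init = init ∨
      ∃ x ∈ xs, xs.foldl (fun a g => max a (f g)) init = f x := by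
  induction xs generalizing init with
  | nil => left; rfl
  | cons h t ih =>
    rcases ih (max init (f h)) with heq | ⟨x, hx, heq⟩
    · rcases max_choice init (f h) with hm | hm
      · left; simpa [hm] using heq
      · right; exact ⟨h, by simp, by simpa [hm] using heq⟩
    · right; exact ⟨x, by simp [hx], heq⟩

lemma any_contains_iff (kws : List String) (groups : List String) :
    (kws.any (fun kw => (groups.map PySem.Str.lower).contains kw) = true) ↔
      ∃ g ∈ groups, PySem.Str.lower g ∈ kws := by
  simp [List.any_eq_true, List.mem_map]
  tauto

-- ===== VERDICT (by name: the statement is the Claim_ definition above) =====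
theorem determine_user_role_py_spec : Claim_equal_determine_user_role_py := by
  intro groups _
  unfold Spec_determine_user_role_py determine_user_role_py determine_user_role_py_alt
  simp only []
  set f : String → Nat := fun g => pvRoleRanks.getD (PySem.Str.lower g) 0 with hf
  set rank := groups.foldl (fun a g => max a (f g)) 0 with hrank
  have hub : ∀ x ∈ groups, f x ≤ rank :=
    (PySem.List.le_foldl_max_nat groups f 0).2
  have hmem := foldl_max_mem_str f groups 0
  have hsup_iff : rank = 2 ↔ ∃ g ∈ groups, f g = 2 := by
    constructor
    · intro h2
      rcases hmem with h0 | ⟨x, hx, hxe⟩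
      · omega
      · exact ⟨x, hx, by omega⟩
    · rintro ⟨g, hg, hg2⟩
      have h1 := hub g hg
      have h2 : f g ≤ 2 := getD_le_two _
      rcases hmem with h0 | ⟨x, hx, hxe⟩
      · omega
      · have h3 : f x ≤ 2 := getD_le_two _
        omega
  have hadm_iff : rank = 1 ↔ (¬ rank = 2) ∧ ∃ g ∈ groups, f g = 1 := by
    constructor
    · intro h1
      refine ⟨by omega, ?_⟩
      rcases hmem with h0 | ⟨x, hx, hxe⟩
      · omega
      · exact ⟨x, hx, by omega⟩
    · rintro ⟨hne2, g, hg, hg1⟩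
      have h1 := hub g hg
      rcases hmem with h0 | ⟨x, hx, hxe⟩
      · omega
      · have h3 : f x ≤ 2 := getD_le_two _
        omega
  by_cases hA : ∃ g ∈ groups, PySem.Str.lower g ∈ (["superadmin", "super-admin", "superadmins"] : List String)
  · have : rank = 2 := by
      apply hsup_iff.2
      rcases hA with ⟨g, hg, hkw⟩
      refine ⟨g, hg, (getD_two_iff _).2 ?_⟩
      simpa using hkw
    have hA' : ((["superadmin", "super-admin", "superadmins"] : List String).any
        (fun kw => (groups.map PySem.Str.lower).contains kw)) = true := (any_contains_iff _ _).2 hA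
    simp only [hA', this, if_pos]
  · have hne2 : ¬ rank = 2 := by
      intro h2
      rcases hsup_iff.1 h2 with ⟨g, hg, hg2⟩
      exact hA ⟨g, hg, by simpa using (getD_two_iff _).1 hg2⟩
    by_cases hB : ∃ g ∈ groups, PySem.Str.lower g ∈ (["admin", "admins", "administrators"] : List String)
    · have : rank = 1 := by
        apply hadm_iff.2
        refine ⟨hne2, ?_⟩
        rcases hB with ⟨g, hg, hkw⟩
        refine ⟨g, hg, (getD_one_iff _).2 ?_⟩
        simpa using hkw
      have hA' : ¬ ((["superadmin", "super-admin", "superadmins"] : List String).any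
          (fun kw => (groups.map PySem.Str.lower).contains kw)) = true :=
        fun h => hA ((any_contains_iff _ _).1 h)
      have hB' : ((["admin", "admins", "administrators"] : List String).any
          (fun kw => (groups.map PySem.Str.lower).contains kw)) = true := (any_contains_iff _ _).2 hB
      simp only [hA', hB', this, if_true, if_false, Bool.false_eq_true]
      simp
    · have hne1 : ¬ rank = 1 := by
        intro h1
        rcases (hadm_iff.1 h1).2 with ⟨g, hg, hg1⟩
        exact hB ⟨g, hg, by simpa using (getD_one_iff _).1 hg1⟩
      have hA' : ¬ ((["superadmin", "super-admin", "superadmins"] : List String).any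
          (fun kw => (groups.map PySem.Str.lower).contains kw)) = true :=
        fun h => hA ((any_contains_iff _ _).1 h)
      have hB' : ¬ ((["admin", "admins", "administrators"] : List String).any
          (fun kw => (groups.map PySem.Str.lower).contains kw)) = true :=
        fun h => hB ((any_contains_iff _ _).1 h)
      simp only [if_neg hA', if_neg hB', if_neg hne2, if_neg hne1]
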